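-- pv_equiv track=rewrite | github.com/reeceomahoney/piper_arm | distal/plotting/plot_gt_returns.py | select_sample_episode_ids
-- ===== SOURCE A (Python) =====
-- def select_sample_episode_ids(
--     success_by_episode: dict[int, int],
--     num_success: int,
--     num_failure: int,
-- ) -> list[int]:
--     success_ids = sorted(ep for ep, s in success_by_episode.items() if s == 1)
--     failure_ids = sorted(ep for ep, s in success_by_episode.items() if s == 0)
--     return success_ids[:num_success] + failure_ids[:num_failure]
-- ===== SOURCE B (Python) =====
-- def _insert_sorted(xs, x):
--     i = 0
--     while i < len(xs) and xs[i] < x: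
--         i += 1
--     return xs[:i] + [x] + xs[i:]
--
--
-- def select_sample_episode_ids(
--     success_by_episode: dict[int, int],
--     num_success: int,
--     num_failure: int,
-- ) -> list[int]:
--     success_ids = []
--     failure_ids = []
--     for ep, s in success_by_episode.items():
--         if s == 1:
--             success_ids = _insert_sorted(success_ids, ep)
--         elif s == 0:
--             failure_ids = _insert_sorted(failure_ids, ep)
--     return success_ids[:num_success] + failure_ids[:num_failure]
-- ===== Notes on version B (the rewrite author's own statement) =====
-- stated objective: alternative
-- what changed: Replaces A's two library filter-and-sort passes by a single incremental pass over the dict items that maintains the success and failure lists sorted at all times via online sorted insertion (an insertion-sort strategy, no library sort).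
import Mathlib
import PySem

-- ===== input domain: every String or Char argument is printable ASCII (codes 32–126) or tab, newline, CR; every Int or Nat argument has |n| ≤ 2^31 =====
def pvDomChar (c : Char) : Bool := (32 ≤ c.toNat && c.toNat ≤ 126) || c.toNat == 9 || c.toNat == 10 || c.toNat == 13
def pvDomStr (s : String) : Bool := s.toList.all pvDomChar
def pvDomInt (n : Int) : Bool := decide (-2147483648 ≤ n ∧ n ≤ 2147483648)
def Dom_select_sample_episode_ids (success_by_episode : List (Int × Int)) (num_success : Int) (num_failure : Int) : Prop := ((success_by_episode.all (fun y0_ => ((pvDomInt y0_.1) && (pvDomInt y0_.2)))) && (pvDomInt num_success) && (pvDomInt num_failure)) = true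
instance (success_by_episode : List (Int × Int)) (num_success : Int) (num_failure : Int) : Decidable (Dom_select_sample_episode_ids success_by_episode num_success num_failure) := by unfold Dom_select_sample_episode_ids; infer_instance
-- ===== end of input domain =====

-- B replaces A's two library filter-and-sort passes by one pass over the dict items that keeps
-- both lists sorted at all times via online sorted insertion (alternative algorithm, no library sort).

-- ===== PORT A =====
def select_sample_episode_ids (success_by_episode : List (Int × Int)) (num_success : Int) (num_failure : Int) : List Int :=
  let d := PySem.Dict.ofList success_by_episode
  let success_ids := PySem.List.sorted ((d.items.filter (fun p => p.2 == 1)).map (fun p => p.1)) (fun x => x) false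
  let failure_ids := PySem.List.sorted ((d.items.filter (fun p => p.2 == 0)).map (fun p => p.1)) (fun x => x) false
  PySem.List.slice success_ids none (some num_success) ++ PySem.List.slice failure_ids none (some num_failure)

-- ===== PORT B =====
-- _insert_sorted: scan past the elements < x, insert x there (xs[:i] + [x] + xs[i:])
def insertSorted : List Int → Int → List Int
  | [], x => [x]
  | y :: t, x => if y < x then y :: insertSorted t x else x :: y :: t

def select_sample_episode_ids_alt (success_by_episode : List (Int × Int)) (num_success : Int) (num_failure : Int) : List Int :=
  let d := PySem.Dict.ofList success_by_episode
  let res := d.items.foldl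
    (fun acc p =>
      if p.2 == 1 then (insertSorted acc.1 p.1, acc.2)
      else if p.2 == 0 then (acc.1, insertSorted acc.2 p.1)
      else acc)
    ([], [])
  PySem.List.slice res.1 none (some num_success) ++ PySem.List.slice res.2 none (some num_failure)

-- ===== PRECONDITION & SPEC =====
def Spec_select_sample_episode_ids (success_by_episode : List (Int × Int)) (num_success : Int) (num_failure : Int) (out : List Int) : Prop := out = select_sample_episode_ids_alt success_by_episode num_success num_failure
instance (success_by_episode : List (Int × Int)) (num_success : Int) (num_failure : Int) (out : List Int) : Decidable (Spec_select_sample_episode_ids success_by_episode num_success num_failure out) := by unfold Spec_select_sample_episode_ids; infer_instance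

-- ===== CLAIM (what is proved, stated in full; the proofs are below) =====
def Claim_equal_select_sample_episode_ids : Prop := ∀ (success_by_episode : List (Int × Int)) (num_success : Int) (num_failure : Int), Dom_select_sample_episode_ids success_by_episode num_success num_failure → Spec_select_sample_episode_ids success_by_episode num_success num_failure (select_sample_episode_ids success_by_episode num_success num_failure)

-- ===== LEMMAS AND PROOFS =====

theorem insertSorted_perm (xs : List Int) (x : Int) : (insertSorted xs x).Perm (x :: xs) := by
  induction xs with
  | nil => simp [insertSorted]
  | cons y t ih =>
    simp only [insertSorted]
    by_cases h : y < x
    · rw [if_pos h]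
      exact (ih.cons y).trans (List.Perm.swap x y t)
    · rw [if_neg h]

theorem insertSorted_pairwise (xs : List Int) (x : Int) (h : xs.Pairwise (· ≤ ·)) :
    (insertSorted xs x).Pairwise (· ≤ ·) := by
  induction xs with
  | nil => simp [insertSorted]
  | cons y t ih =>
    rcases List.pairwise_cons.mp h with ⟨hy, ht⟩
    simp only [insertSorted]
    by_cases hlt : y < x
    · rw [if_pos hlt]
      refine List.pairwise_cons.mpr ⟨?_, ih ht⟩
      intro z hz
      rcases List.mem_cons.mp (((insertSorted_perm t x).mem_iff).mp hz) with rfl | hzt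
      · exact le_of_lt hlt
      · exact hy z hzt
    · rw [if_neg hlt]
      refine List.pairwise_cons.mpr ⟨?_, h⟩
      intro z hz
      rcases List.mem_cons.mp hz with rfl | hzt
      · exact le_of_not_gt hlt
      · exact le_trans (le_of_not_gt hlt) (hy z hzt)

theorem foldl_insertSorted_perm (l : List Int) (a : List Int) :
    (l.foldl insertSorted a).Perm (a ++ l) := by
  induction l generalizing a with
  | nil => simp
  | cons x t ih =>
    simp only [List.foldl_cons]
    refine (ih (insertSorted a x)).trans ?_
    have h1 : (insertSorted a x ++ t).Perm ((x :: a) ++ t) := (insertSorted_perm a x).append_right t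
    exact h1.trans (by simpa using (List.perm_middle (a := x) (l₁ := a) (l₂ := t)).symm)

theorem foldl_insertSorted_pairwise (l : List Int) (a : List Int) (h : a.Pairwise (· ≤ ·)) :
    (l.foldl insertSorted a).Pairwise (· ≤ ·) := by
  induction l generalizing a with
  | nil => simpa
  | cons x t ih => exact ih _ (insertSorted_pairwise a x h)

-- B's single partition fold over the items is two folds over the filtered episode ids.
theorem pairfold_eq (l : List (Int × Int)) (a b : List Int) :
    l.foldl
      (fun acc p =>
        if p.2 == 1 then (insertSorted acc.1 p.1, acc.2)
        else if p.2 == 0 then (acc.1, insertSorted acc.2 p.1)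
        else acc)
      (a, b)
    = (((l.filter (fun p => p.2 == 1)).map (fun p => p.1)).foldl insertSorted a,
       ((l.filter (fun p => p.2 == 0)).map (fun p => p.1)).foldl insertSorted b) := by
  induction l generalizing a b with
  | nil => simp
  | cons x t ih =>
    simp only [List.foldl_cons, List.filter_cons]
    by_cases h1 : x.2 == 1
    · have h0 : ¬ (x.2 == 0) := by simp_all
      rw [if_pos h1, ih, if_pos h1, if_neg h0]
      simp
    · by_cases h0 : x.2 == 0
      · rw [if_neg h1, if_pos h0, ih, if_neg h1, if_pos h0]
        simp
      · rw [if_neg h1, if_neg h0, ih, if_neg h1, if_neg h0]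

theorem sorted_eq_foldl_insertSorted (l : List Int) :
    PySem.List.sorted l (fun x => x) false = l.foldl insertSorted [] := by
  apply PySem.List.sorted_id_eq_of_perm_of_pairwise
  · simpa using foldl_insertSorted_perm l []
  · exact foldl_insertSorted_pairwise l [] (by simp)

-- ===== VERDICT (by name: the statement is the Claim_ definition above) =====
theorem select_sample_episode_ids_spec : Claim_equal_select_sample_episode_ids := by
  intro xs ns nf _
  unfold Spec_select_sample_episode_ids select_sample_episode_ids select_sample_episode_ids_alt
  simp only [pairfold_eq, sorted_eq_foldl_insertSorted]
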